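-- pv_equiv track=rewrite | github.com/woghks778803/algorithm-study | backjoon/Sliver/9184.py | w
-- ===== SOURCE A (Python) =====
-- def w(a, b, c):
--     if a <= 0 or b <= 0 or c <= 0:
--         return 1
--     elif a > 20 or b > 20 or c > 20:
--         return w(20, 20, 20)
--     elif arr[a][b][c] != 0:
--         return arr[a][b][c]
--     elif a < b and b < c:
--         arr[a][b][c-1] = w(a, b, c-1)
--         arr[a][b-1][c-1] = w(a, b-1, c-1)
--         arr[a][b-1][c] = w(a, b-1, c)
--         return arr[a][b][c-1] + arr[a][b-1][c-1] - arr[a][b-1][c]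
--         # arr[a][b][c] = w(a, b, c-1) + w(a, b-1, c-1) - w(a, b-1, c)
--         # return arr[a][b][c]
--         # return w(a, b, c-1) + w(a, b-1, c-1) - w(a, b-1, c)
--     else:
--         arr[a-1][b][c] = w(a-1, b, c)
--         arr[a-1][b-1][c] = w(a-1, b-1, c)
--         arr[a-1][b][c-1] = w(a-1, b, c-1)
--         arr[a-1][b-1][c-1] = w(a-1, b-1, c-1)
--         return arr[a-1][b][c] + arr[a-1][b-1][c] + arr[a-1][b][c-1] - arr[a-1][b-1][c-1]
--
-- arr = [[[0 for i in range(50)] for j in range(50)] for k in range(50)]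
-- ===== SOURCE B (Python) =====
-- def w(a, b, c):
--     # bottom-up DP: fill the whole 20x20x20 table once, then look up
--     if a <= 0 or b <= 0 or c <= 0:
--         return 1
--     t = {}
--
--     def g(u, v, s):
--         return 1 if u <= 0 or v <= 0 or s <= 0 else t[(u, v, s)]
--
--     for i in range(8000):
--         x, y, z = i // 400 + 1, i // 20 % 20 + 1, i % 20 + 1
--         if x < y and y < z:
--             t[(x, y, z)] = g(x, y, z - 1) + g(x, y - 1, z - 1) - g(x, y - 1, z)
--         else:
--             t[(x, y, z)] = (g(x - 1, y, z) + g(x - 1, y - 1, z)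
--                             + g(x - 1, y, z - 1) - g(x - 1, y - 1, z - 1))
--     if a > 20 or b > 20 or c > 20:
--         return t[(20, 20, 20)]
--     return t[(a, b, c)]
-- ===== Notes on version B (the rewrite author's own statement) =====
-- stated objective: alternative
-- what changed: Replaces the memoized recursion over a mutable global 50x50x50 array with a bottom-up dynamic program: one flat loop fills the 20x20x20 table in increasing index order, then w is a pure dispatcher (1 if any argument is nonpositive, the top clamp cell if any argument exceeds 20, else the looked-up cell).
import Mathlib
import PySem

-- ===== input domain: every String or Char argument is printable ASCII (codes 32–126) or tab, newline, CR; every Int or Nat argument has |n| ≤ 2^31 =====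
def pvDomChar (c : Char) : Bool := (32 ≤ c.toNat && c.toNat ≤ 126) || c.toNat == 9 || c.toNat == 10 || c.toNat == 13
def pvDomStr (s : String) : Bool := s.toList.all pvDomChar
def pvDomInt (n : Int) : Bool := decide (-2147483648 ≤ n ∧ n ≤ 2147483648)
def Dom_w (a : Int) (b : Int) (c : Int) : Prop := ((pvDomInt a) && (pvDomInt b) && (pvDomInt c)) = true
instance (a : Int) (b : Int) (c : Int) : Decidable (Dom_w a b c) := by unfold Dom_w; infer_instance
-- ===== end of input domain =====

-- B replaces A's memoized recursion (which mutates a module-global array; the equivalence proved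
-- here is about the RETURN value only) with a bottom-up DP table plus a lookup dispatcher
-- (objective: alternative decomposition, not faster).

-- ===== PORT A =====
-- A's recursion terminates; this measure witnesses it (0 for the base case, 61 for the
-- clamped region whose one call lands on (20,20,20) of measure 60, else the coordinate sum).
def pvMeas (a b c : Int) : Nat :=
  if a ≤ 0 ∨ b ≤ 0 ∨ c ≤ 0 then 0
  else if 20 < a ∨ 20 < b ∨ 20 < c then 61
  else a.toNat + b.toNat + c.toNat


-- cited by the ports' decreasing_by (termination facts about the measure)
theorem pvMeas_clamp_lt (a b c : Int) (h1 : ¬(a ≤ 0 ∨ b ≤ 0 ∨ c ≤ 0))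
    (h2 : 20 < a ∨ 20 < b ∨ 20 < c) : pvMeas 20 20 20 < pvMeas a b c := by
  unfold pvMeas; split_ifs <;> omega

theorem pvMeas_lt_of (a b c x y z : Int) (h1 : ¬(a ≤ 0 ∨ b ≤ 0 ∨ c ≤ 0))
    (h2 : ¬(20 < a ∨ 20 < b ∨ 20 < c)) (hx1 : a - 1 ≤ x) (hx2 : x ≤ a)
    (hy1 : b - 1 ≤ y) (hy2 : y ≤ b) (hz1 : c - 1 ≤ z) (hz2 : z ≤ c)
    (hlt : x + y + z < a + b + c) : pvMeas x y z < pvMeas a b c := by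
  have hs : pvMeas a b c = a.toNat + b.toNat + c.toNat := by
    unfold pvMeas; rw [if_neg h1, if_neg h2]
  rw [hs]; unfold pvMeas; split_ifs <;> omega

theorem pvMeas_dec_c (a b c : Int) (h1 : ¬(a ≤ 0 ∨ b ≤ 0 ∨ c ≤ 0))
    (h2 : ¬(20 < a ∨ 20 < b ∨ 20 < c)) : pvMeas a b (c-1) < pvMeas a b c :=
  pvMeas_lt_of a b c a b (c-1) h1 h2 (by omega) (by omega) (by omega) (by omega)
    (by omega) (by omega) (by omega)

theorem pvMeas_dec_b (a b c : Int) (h1 : ¬(a ≤ 0 ∨ b ≤ 0 ∨ c ≤ 0))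
    (h2 : ¬(20 < a ∨ 20 < b ∨ 20 < c)) : pvMeas a (b-1) c < pvMeas a b c :=
  pvMeas_lt_of a b c a (b-1) c h1 h2 (by omega) (by omega) (by omega) (by omega)
    (by omega) (by omega) (by omega)

theorem pvMeas_dec_bc (a b c : Int) (h1 : ¬(a ≤ 0 ∨ b ≤ 0 ∨ c ≤ 0))
    (h2 : ¬(20 < a ∨ 20 < b ∨ 20 < c)) : pvMeas a (b-1) (c-1) < pvMeas a b c :=
  pvMeas_lt_of a b c a (b-1) (c-1) h1 h2 (by omega) (by omega) (by omega) (by omega)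
    (by omega) (by omega) (by omega)

theorem pvMeas_dec_a (a b c : Int) (h1 : ¬(a ≤ 0 ∨ b ≤ 0 ∨ c ≤ 0))
    (h2 : ¬(20 < a ∨ 20 < b ∨ 20 < c)) : pvMeas (a-1) b c < pvMeas a b c :=
  pvMeas_lt_of a b c (a-1) b c h1 h2 (by omega) (by omega) (by omega) (by omega)
    (by omega) (by omega) (by omega)

theorem pvMeas_dec_ab (a b c : Int) (h1 : ¬(a ≤ 0 ∨ b ≤ 0 ∨ c ≤ 0))
    (h2 : ¬(20 < a ∨ 20 < b ∨ 20 < c)) : pvMeas (a-1) (b-1) c < pvMeas a b c :=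
  pvMeas_lt_of a b c (a-1) (b-1) c h1 h2 (by omega) (by omega) (by omega) (by omega)
    (by omega) (by omega) (by omega)

theorem pvMeas_dec_ac (a b c : Int) (h1 : ¬(a ≤ 0 ∨ b ≤ 0 ∨ c ≤ 0))
    (h2 : ¬(20 < a ∨ 20 < b ∨ 20 < c)) : pvMeas (a-1) b (c-1) < pvMeas a b c :=
  pvMeas_lt_of a b c (a-1) b (c-1) h1 h2 (by omega) (by omega) (by omega) (by omega)
    (by omega) (by omega) (by omega)

theorem pvMeas_dec_abc (a b c : Int) (h1 : ¬(a ≤ 0 ∨ b ≤ 0 ∨ c ≤ 0))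
    (h2 : ¬(20 < a ∨ 20 < b ∨ 20 < c)) : pvMeas (a-1) (b-1) (c-1) < pvMeas a b c :=
  pvMeas_lt_of a b c (a-1) (b-1) (c-1) h1 h2 (by omega) (by omega) (by omega) (by omega)
    (by omega) (by omega) (by omega)

-- A's global array `arr`, rendered as a threaded map state: a cell never written reads 0,
-- exactly like the zero-initialised 50×50×50 array (read = getD 0, write = insert).
-- `arr[k] = w(...)`: store a call's result in its state at key k
def aPut (r : Int × (Std.HashMap (Int × Int × Int) Int)) (k : Int × Int × Int) :
    Std.HashMap (Int × Int × Int) Int :=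
  r.2.insert k r.1

-- literal transliteration of A's `w`, threading the array state
def wGo (arr : Std.HashMap (Int × Int × Int) Int) (a b c : Int) :
    Int × (Std.HashMap (Int × Int × Int) Int) :=
  if a ≤ 0 ∨ b ≤ 0 ∨ c ≤ 0 then (1, arr)
  else if 20 < a ∨ 20 < b ∨ 20 < c then wGo arr 20 20 20
  else if arr.getD (a, b, c) 0 ≠ 0 then (arr.getD (a, b, c) 0, arr)
  else if a < b ∧ b < c then
    let m1 := aPut (wGo arr a b (c-1)) (a, b, c-1)
    let m2 := aPut (wGo m1 a (b-1) (c-1)) (a, b-1, c-1)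
    let m3 := aPut (wGo m2 a (b-1) c) (a, b-1, c)
    (m3.getD (a, b, c-1) 0 + m3.getD (a, b-1, c-1) 0 - m3.getD (a, b-1, c) 0, m3)
  else
    let m1 := aPut (wGo arr (a-1) b c) (a-1, b, c)
    let m2 := aPut (wGo m1 (a-1) (b-1) c) (a-1, b-1, c)
    let m3 := aPut (wGo m2 (a-1) b (c-1)) (a-1, b, c-1)
    let m4 := aPut (wGo m3 (a-1) (b-1) (c-1)) (a-1, b-1, c-1)
    (m4.getD (a-1, b, c) 0 + m4.getD (a-1, b-1, c) 0 + m4.getD (a-1, b, c-1) 0 - m4.getD (a-1, b-1, c-1) 0, m4)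
termination_by pvMeas a b c
decreasing_by
  all_goals first
    | exact pvMeas_clamp_lt _ _ _ ‹_› ‹_›
    | exact pvMeas_dec_c _ _ _ ‹_› ‹_›
    | exact pvMeas_dec_b _ _ _ ‹_› ‹_›
    | exact pvMeas_dec_bc _ _ _ ‹_› ‹_›
    | exact pvMeas_dec_a _ _ _ ‹_› ‹_›
    | exact pvMeas_dec_ab _ _ _ ‹_› ‹_›
    | exact pvMeas_dec_ac _ _ _ ‹_› ‹_›
    | exact pvMeas_dec_abc _ _ _ ‹_› ‹_›

-- the global starts as all zeros, and the memo only ever stores correct values, so the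
-- return value of each call equals the one computed from a zero state
def w (a : Int) (b : Int) (c : Int) : Int := (wGo ∅ a b c).1

-- ===== PORT B =====
-- helper g of Source B; the dict read t[(x,y,z)] always hits a present key (proved below)
def bGet (t : Std.HashMap (Int × Int × Int) Int) (x y z : Int) : Int :=
  if x ≤ 0 ∨ y ≤ 0 ∨ z ≤ 0 then 1 else t.getD (x, y, z) 0

-- loop body of Source B once x, y, z are decoded
def bCell (t : Std.HashMap (Int × Int × Int) Int) (x y z : Int) :
    Std.HashMap (Int × Int × Int) Int :=
  if x < y ∧ y < z then
    t.insert (x, y, z) (bGet t x y (z-1) + bGet t x (y-1) (z-1) - bGet t x (y-1) z)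
  else
    t.insert (x, y, z) (bGet t (x-1) y z + bGet t (x-1) (y-1) z
      + bGet t (x-1) y (z-1) - bGet t (x-1) (y-1) (z-1))

-- one iteration of Source B's flat loop: decode i into (x, y, z), then fill the cell
def bStep (t : Std.HashMap (Int × Int × Int) Int) (i : Int) :
    Std.HashMap (Int × Int × Int) Int :=
  bCell t (PySem.Int.floordiv i 400 + 1)
    (PySem.Int.mod (PySem.Int.floordiv i 20) 20 + 1) (PySem.Int.mod i 20 + 1)

def bTable : Std.HashMap (Int × Int × Int) Int :=
  (PySem.List.pyRange 0 8000 1).foldl bStep ∅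

def w_alt (a : Int) (b : Int) (c : Int) : Int :=
  if a ≤ 0 ∨ b ≤ 0 ∨ c ≤ 0 then 1
  else if 20 < a ∨ 20 < b ∨ 20 < c then bTable.getD (20, 20, 20) 0
  else bTable.getD (a, b, c) 0

-- ===== PRECONDITION & SPEC =====
def Spec_w (a : Int) (b : Int) (c : Int) (out : Int) : Prop := out = w_alt a b c
instance (a : Int) (b : Int) (c : Int) (out : Int) : Decidable (Spec_w a b c out) := by
  unfold Spec_w; infer_instance

-- ===== CLAIM (what is proved, stated in full; the proofs are below) =====
def Claim_equal_w : Prop := ∀ (a : Int) (b : Int) (c : Int), Dom_w a b c → Spec_w a b c (w a b c)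

-- ===== LEMMAS AND PROOFS =====

-- the pure recurrence both programs compute
def pw (a b c : Int) : Int :=
  if a ≤ 0 ∨ b ≤ 0 ∨ c ≤ 0 then 1
  else if 20 < a ∨ 20 < b ∨ 20 < c then pw 20 20 20
  else if a < b ∧ b < c then
    pw a b (c-1) + pw a (b-1) (c-1) - pw a (b-1) c
  else
    pw (a-1) b c + pw (a-1) (b-1) c + pw (a-1) b (c-1) - pw (a-1) (b-1) (c-1)
termination_by pvMeas a b c
decreasing_by
  all_goals first
    | exact pvMeas_clamp_lt _ _ _ ‹_› ‹_›
    | exact pvMeas_dec_c _ _ _ ‹_› ‹_›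
    | exact pvMeas_dec_b _ _ _ ‹_› ‹_›
    | exact pvMeas_dec_bc _ _ _ ‹_› ‹_›
    | exact pvMeas_dec_a _ _ _ ‹_› ‹_›
    | exact pvMeas_dec_ab _ _ _ ‹_› ‹_›
    | exact pvMeas_dec_ac _ _ _ ‹_› ‹_›
    | exact pvMeas_dec_abc _ _ _ ‹_› ‹_›

def pw3 (k : Int × Int × Int) : Int := pw k.1 k.2.1 k.2.2

-- Std.HashMap.getD_insert with the test written as propositional equality
theorem hmGetD_insert (m : Std.HashMap (Int × Int × Int) Int) (k k' : Int × Int × Int) (v : Int) :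
    (m.insert k v).getD k' 0 = if k' = k then v else m.getD k' 0 := by
  rw [Std.HashMap.getD_insert]
  by_cases h : k' = k
  · simp [h]
  · rw [if_neg (by simpa using (Ne.symm h)), if_neg h]

-- measure bookkeeping cited inside wGo_main (keeps proof terms small)
theorem pvMeas_clamp_le (a b c : Int) (n : Nat) (h1 : ¬(a ≤ 0 ∨ b ≤ 0 ∨ c ≤ 0))
    (h2 : 20 < a ∨ 20 < b ∨ 20 < c) (hm : pvMeas a b c ≤ n + 1) :
    pvMeas 20 20 20 ≤ n := by
  unfold pvMeas at hm ⊢; split_ifs at hm ⊢ <;> omega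

theorem pvMeas_le_of (a b c x y z : Int) (n : Nat) (h1 : ¬(a ≤ 0 ∨ b ≤ 0 ∨ c ≤ 0))
    (h2 : ¬(20 < a ∨ 20 < b ∨ 20 < c)) (hx1 : a - 1 ≤ x) (hx2 : x ≤ a)
    (hy1 : b - 1 ≤ y) (hy2 : y ≤ b) (hz1 : c - 1 ≤ z) (hz2 : z ≤ c)
    (hlt : x + y + z < a + b + c) (hm : pvMeas a b c ≤ n + 1) : pvMeas x y z ≤ n := by
  unfold pvMeas at hm ⊢; split_ifs at hm ⊢ <;> omega

-- A side: from a state whose nonzero cells hold correct values, wGo returns the pure value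
-- and every cell of the final state is either untouched or holds its correct value.
theorem wGo_main (n : Nat) : ∀ (a b c : Int) (arr : Std.HashMap (Int × Int × Int) Int),
    pvMeas a b c ≤ n →
    (∀ k, arr.getD k 0 = 0 ∨ arr.getD k 0 = pw3 k) →
    (wGo arr a b c).1 = pw a b c ∧
      (∀ k, (wGo arr a b c).2.getD k 0 = arr.getD k 0 ∨ (wGo arr a b c).2.getD k 0 = pw3 k) := by
  induction n with
  | zero =>
    intro a b c arr hm _
    have h1 : a ≤ 0 ∨ b ≤ 0 ∨ c ≤ 0 := by
      unfold pvMeas at hm; split_ifs at hm with p1 p2 <;> first | exact p1 | omega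
    rw [wGo, if_pos h1]
    refine ⟨?_, fun k => Or.inl rfl⟩
    rw [pw, if_pos h1]
  | succ n ih =>
    intro a b c arr hm hinv
    rw [wGo]
    split_ifs with h1 h2 h3 h4
    · refine ⟨?_, fun k => Or.inl rfl⟩
      rw [pw, if_pos h1]
    · have h60 : pvMeas 20 20 20 ≤ n := pvMeas_clamp_le a b c n h1 h2 hm
      obtain ⟨hv, hp⟩ := ih 20 20 20 arr h60 hinv
      refine ⟨?_, hp⟩
      rw [hv]; conv_rhs => rw [pw]
      rw [if_neg h1, if_pos h2]
    · refine ⟨?_, fun k => Or.inl rfl⟩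
      show arr.getD (a, b, c) 0 = pw a b c
      rcases hinv (a, b, c) with h | h
      · exact absurd h h3
      · exact h
    · -- a < b < c branch
      simp only []
      have hc1 : pvMeas a b (c-1) ≤ n :=
        pvMeas_le_of a b c a b (c-1) n h1 h2 (by omega) (by omega) (by omega)
          (by omega) (by omega) (by omega) (by omega) hm
      obtain ⟨hv1, hp1⟩ := ih a b (c-1) arr hc1 hinv
      set r1 := wGo arr a b (c-1) with hr1
      set m1 := aPut r1 (a, b, c-1) with hm1
      have pres1 : ∀ k, m1.getD k 0 = arr.getD k 0 ∨ m1.getD k 0 = pw3 k := by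
        intro k
        by_cases hk : k = (a, b, c-1)
        · right; rw [hm1]; unfold aPut; rw [hmGetD_insert, if_pos hk, hv1, hk]; rfl
        · rw [hm1]; unfold aPut; rw [hmGetD_insert, if_neg hk]; exact hp1 k
      have hinv1 : ∀ k, m1.getD k 0 = 0 ∨ m1.getD k 0 = pw3 k := by
        intro k; rcases pres1 k with h | h
        · rw [h]; exact hinv k
        · exact Or.inr h
      have hself1 : m1.getD (a, b, c-1) 0 = pw3 (a, b, c-1) := by
        rw [hm1]; unfold aPut; rw [hmGetD_insert, if_pos rfl, hv1]; rfl
      have hc2 : pvMeas a (b-1) (c-1) ≤ n :=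
        pvMeas_le_of a b c a (b-1) (c-1) n h1 h2 (by omega) (by omega) (by omega)
          (by omega) (by omega) (by omega) (by omega) hm
      obtain ⟨hv2, hp2⟩ := ih a (b-1) (c-1) m1 hc2 hinv1
      set r2 := wGo m1 a (b-1) (c-1) with hr2
      set m2 := aPut r2 (a, b-1, c-1) with hm2
      have pres2 : ∀ k, m2.getD k 0 = m1.getD k 0 ∨ m2.getD k 0 = pw3 k := by
        intro k
        by_cases hk : k = (a, b-1, c-1)
        · right; rw [hm2]; unfold aPut; rw [hmGetD_insert, if_pos hk, hv2, hk]; rfl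
        · rw [hm2]; unfold aPut; rw [hmGetD_insert, if_neg hk]; exact hp2 k
      have hinv2 : ∀ k, m2.getD k 0 = 0 ∨ m2.getD k 0 = pw3 k := by
        intro k; rcases pres2 k with h | h
        · rw [h]; exact hinv1 k
        · exact Or.inr h
      have hself2 : m2.getD (a, b-1, c-1) 0 = pw3 (a, b-1, c-1) := by
        rw [hm2]; unfold aPut; rw [hmGetD_insert, if_pos rfl, hv2]; rfl
      have keep2 : ∀ k, m1.getD k 0 = pw3 k → m2.getD k 0 = pw3 k := by
        intro k hk; rcases pres2 k with h | h
        · rw [h, hk]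
        · exact h
      have hc3 : pvMeas a (b-1) c ≤ n :=
        pvMeas_le_of a b c a (b-1) c n h1 h2 (by omega) (by omega) (by omega)
          (by omega) (by omega) (by omega) (by omega) hm
      obtain ⟨hv3, hp3⟩ := ih a (b-1) c m2 hc3 hinv2
      set r3 := wGo m2 a (b-1) c with hr3
      set m3 := aPut r3 (a, b-1, c) with hm3
      have pres3 : ∀ k, m3.getD k 0 = m2.getD k 0 ∨ m3.getD k 0 = pw3 k := by
        intro k
        by_cases hk : k = (a, b-1, c)
        · right; rw [hm3]; unfold aPut; rw [hmGetD_insert, if_pos hk, hv3, hk]; rfl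
        · rw [hm3]; unfold aPut; rw [hmGetD_insert, if_neg hk]; exact hp3 k
      have hself3 : m3.getD (a, b-1, c) 0 = pw3 (a, b-1, c) := by
        rw [hm3]; unfold aPut; rw [hmGetD_insert, if_pos rfl, hv3]; rfl
      have keep3 : ∀ k, m2.getD k 0 = pw3 k → m3.getD k 0 = pw3 k := by
        intro k hk; rcases pres3 k with h | h
        · rw [h, hk]
        · exact h
      refine ⟨?_, ?_⟩
      · show m3.getD (a, b, c-1) 0 + m3.getD (a, b-1, c-1) 0 - m3.getD (a, b-1, c) 0 = pw a b c
        rw [keep3 _ (keep2 _ hself1), keep3 _ hself2, hself3]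
        conv_rhs => rw [pw]
        rw [if_neg h1, if_neg h2, if_pos h4]; rfl
      · intro k
        rcases pres3 k with h | h
        · rcases pres2 k with h' | h'
          · rcases pres1 k with h'' | h''
            · exact Or.inl (by rw [h, h', h''])
            · exact Or.inr (by rw [h, h', h''])
          · exact Or.inr (by rw [h, h'])
        · exact Or.inr h
    · -- else branch
      simp only []
      have hc1 : pvMeas (a-1) b c ≤ n :=
        pvMeas_le_of a b c (a-1) b c n h1 h2 (by omega) (by omega) (by omega)
          (by omega) (by omega) (by omega) (by omega) hm
      obtain ⟨hv1, hp1⟩ := ih (a-1) b c arr hc1 hinv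
      set r1 := wGo arr (a-1) b c with hr1
      set m1 := aPut r1 (a-1, b, c) with hm1
      have pres1 : ∀ k, m1.getD k 0 = arr.getD k 0 ∨ m1.getD k 0 = pw3 k := by
        intro k
        by_cases hk : k = (a-1, b, c)
        · right; rw [hm1]; unfold aPut; rw [hmGetD_insert, if_pos hk, hv1, hk]; rfl
        · rw [hm1]; unfold aPut; rw [hmGetD_insert, if_neg hk]; exact hp1 k
      have hinv1 : ∀ k, m1.getD k 0 = 0 ∨ m1.getD k 0 = pw3 k := by
        intro k; rcases pres1 k with h | h
        · rw [h]; exact hinv k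
        · exact Or.inr h
      have hself1 : m1.getD (a-1, b, c) 0 = pw3 (a-1, b, c) := by
        rw [hm1]; unfold aPut; rw [hmGetD_insert, if_pos rfl, hv1]; rfl
      have hc2 : pvMeas (a-1) (b-1) c ≤ n :=
        pvMeas_le_of a b c (a-1) (b-1) c n h1 h2 (by omega) (by omega) (by omega)
          (by omega) (by omega) (by omega) (by omega) hm
      obtain ⟨hv2, hp2⟩ := ih (a-1) (b-1) c m1 hc2 hinv1
      set r2 := wGo m1 (a-1) (b-1) c with hr2
      set m2 := aPut r2 (a-1, b-1, c) with hm2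
      have pres2 : ∀ k, m2.getD k 0 = m1.getD k 0 ∨ m2.getD k 0 = pw3 k := by
        intro k
        by_cases hk : k = (a-1, b-1, c)
        · right; rw [hm2]; unfold aPut; rw [hmGetD_insert, if_pos hk, hv2, hk]; rfl
        · rw [hm2]; unfold aPut; rw [hmGetD_insert, if_neg hk]; exact hp2 k
      have hinv2 : ∀ k, m2.getD k 0 = 0 ∨ m2.getD k 0 = pw3 k := by
        intro k; rcases pres2 k with h | h
        · rw [h]; exact hinv1 k
        · exact Or.inr h
      have hself2 : m2.getD (a-1, b-1, c) 0 = pw3 (a-1, b-1, c) := by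
        rw [hm2]; unfold aPut; rw [hmGetD_insert, if_pos rfl, hv2]; rfl
      have keep2 : ∀ k, m1.getD k 0 = pw3 k → m2.getD k 0 = pw3 k := by
        intro k hk; rcases pres2 k with h | h
        · rw [h, hk]
        · exact h
      have hc3 : pvMeas (a-1) b (c-1) ≤ n :=
        pvMeas_le_of a b c (a-1) b (c-1) n h1 h2 (by omega) (by omega) (by omega)
          (by omega) (by omega) (by omega) (by omega) hm
      obtain ⟨hv3, hp3⟩ := ih (a-1) b (c-1) m2 hc3 hinv2
      set r3 := wGo m2 (a-1) b (c-1) with hr3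
      set m3 := aPut r3 (a-1, b, c-1) with hm3
      have pres3 : ∀ k, m3.getD k 0 = m2.getD k 0 ∨ m3.getD k 0 = pw3 k := by
        intro k
        by_cases hk : k = (a-1, b, c-1)
        · right; rw [hm3]; unfold aPut; rw [hmGetD_insert, if_pos hk, hv3, hk]; rfl
        · rw [hm3]; unfold aPut; rw [hmGetD_insert, if_neg hk]; exact hp3 k
      have hinv3 : ∀ k, m3.getD k 0 = 0 ∨ m3.getD k 0 = pw3 k := by
        intro k; rcases pres3 k with h | h
        · rw [h]; exact hinv2 k
        · exact Or.inr h
      have hself3 : m3.getD (a-1, b, c-1) 0 = pw3 (a-1, b, c-1) := by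
        rw [hm3]; unfold aPut; rw [hmGetD_insert, if_pos rfl, hv3]; rfl
      have keep3 : ∀ k, m2.getD k 0 = pw3 k → m3.getD k 0 = pw3 k := by
        intro k hk; rcases pres3 k with h | h
        · rw [h, hk]
        · exact h
      have hc4 : pvMeas (a-1) (b-1) (c-1) ≤ n :=
        pvMeas_le_of a b c (a-1) (b-1) (c-1) n h1 h2 (by omega) (by omega) (by omega)
          (by omega) (by omega) (by omega) (by omega) hm
      obtain ⟨hv4, hp4⟩ := ih (a-1) (b-1) (c-1) m3 hc4 hinv3
      set r4 := wGo m3 (a-1) (b-1) (c-1) with hr4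
      set m4 := aPut r4 (a-1, b-1, c-1) with hm4
      have pres4 : ∀ k, m4.getD k 0 = m3.getD k 0 ∨ m4.getD k 0 = pw3 k := by
        intro k
        by_cases hk : k = (a-1, b-1, c-1)
        · right; rw [hm4]; unfold aPut; rw [hmGetD_insert, if_pos hk, hv4, hk]; rfl
        · rw [hm4]; unfold aPut; rw [hmGetD_insert, if_neg hk]; exact hp4 k
      have hself4 : m4.getD (a-1, b-1, c-1) 0 = pw3 (a-1, b-1, c-1) := by
        rw [hm4]; unfold aPut; rw [hmGetD_insert, if_pos rfl, hv4]; rfl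
      have keep4 : ∀ k, m3.getD k 0 = pw3 k → m4.getD k 0 = pw3 k := by
        intro k hk; rcases pres4 k with h | h
        · rw [h, hk]
        · exact h
      refine ⟨?_, ?_⟩
      · show m4.getD (a-1, b, c) 0 + m4.getD (a-1, b-1, c) 0 + m4.getD (a-1, b, c-1) 0 - m4.getD (a-1, b-1, c-1) 0 = pw a b c
        rw [keep4 _ (keep3 _ (keep2 _ hself1)), keep4 _ (keep3 _ hself2),
          keep4 _ hself3, hself4]
        conv_rhs => rw [pw]
        rw [if_neg h1, if_neg h2, if_neg h4]; rfl
      · intro k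
        rcases pres4 k with h | h
        · rcases pres3 k with h' | h'
          · rcases pres2 k with h'' | h''
            · rcases pres1 k with h''' | h'''
              · exact Or.inl (by rw [h, h', h'', h'''])
              · exact Or.inr (by rw [h, h', h'', h'''])
            · exact Or.inr (by rw [h, h', h''])
          · exact Or.inr (by rw [h, h'])
        · exact Or.inr h

theorem w_eq_pw (a b c : Int) : w a b c = pw a b c :=
  (wGo_main (pvMeas a b c) a b c ∅ le_rfl (fun _ => Or.inl (by simp [Std.HashMap.getD_empty]))).1

-- B side: after N loop iterations every cell with flat index < N holds its correct value
def Good (N : Nat) (t : Std.HashMap (Int × Int × Int) Int) : Prop :=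
  ∀ x y z : Int, 1 ≤ x → x ≤ 20 → 1 ≤ y → y ≤ 20 → 1 ≤ z → z ≤ 20 →
    (x-1)*400 + (y-1)*20 + (z-1) < (N : Int) →
    t.getD (x, y, z) 0 = pw x y z

theorem bGet_pw (N : Nat) (t : Std.HashMap (Int × Int × Int) Int) (hg : Good N t)
    (x y z : Int) (hx : x ≤ 20) (hy : y ≤ 20) (hz : z ≤ 20)
    (h : 1 ≤ x → 1 ≤ y → 1 ≤ z → (x-1)*400 + (y-1)*20 + (z-1) < (N : Int)) :
    bGet t x y z = pw x y z := by
  unfold bGet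
  split_ifs with h0
  · rw [pw, if_pos h0]
  · push Not at h0
    exact hg x y z (by omega) hx (by omega) hy (by omega) hz
      (h (by omega) (by omega) (by omega))

theorem bCell_good (N : Nat) (t : Std.HashMap (Int × Int × Int) Int) (hg : Good N t)
    (x y z : Int) (hx1 : 1 ≤ x) (hx2 : x ≤ 20) (hy1 : 1 ≤ y) (hy2 : y ≤ 20)
    (hz1 : 1 ≤ z) (hz2 : z ≤ 20)
    (hidx : (x-1)*400 + (y-1)*20 + (z-1) = (N : Int)) :
    Good (N+1) (bCell t x y z) := by
  have hval : (if x < y ∧ y < z then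
      bGet t x y (z-1) + bGet t x (y-1) (z-1) - bGet t x (y-1) z
    else
      bGet t (x-1) y z + bGet t (x-1) (y-1) z
        + bGet t (x-1) y (z-1) - bGet t (x-1) (y-1) (z-1)) = pw x y z := by
    split_ifs with hlt
    · rw [bGet_pw N t hg x y (z-1) hx2 hy2 (by omega) (by intros; omega),
        bGet_pw N t hg x (y-1) (z-1) hx2 (by omega) (by omega) (by intros; omega),
        bGet_pw N t hg x (y-1) z hx2 (by omega) hz2 (by intros; omega)]
      conv_rhs => rw [pw]
      rw [if_neg (by omega), if_neg (by omega), if_pos hlt]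
    · rw [bGet_pw N t hg (x-1) y z (by omega) hy2 hz2 (by intros; omega),
        bGet_pw N t hg (x-1) (y-1) z (by omega) (by omega) hz2 (by intros; omega),
        bGet_pw N t hg (x-1) y (z-1) (by omega) hy2 (by omega) (by intros; omega),
        bGet_pw N t hg (x-1) (y-1) (z-1) (by omega) (by omega) (by omega) (by intros; omega)]
      conv_rhs => rw [pw]
      rw [if_neg (by omega), if_neg (by omega), if_neg hlt]
  intro x' y' z' hx1' hx2' hy1' hy2' hz1' hz2' hidx'
  have hstep : bCell t x y z = t.insert (x, y, z)
      (if x < y ∧ y < z then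
        bGet t x y (z-1) + bGet t x (y-1) (z-1) - bGet t x (y-1) z
      else
        bGet t (x-1) y z + bGet t (x-1) (y-1) z
          + bGet t (x-1) y (z-1) - bGet t (x-1) (y-1) (z-1)) := by
    unfold bCell; split_ifs <;> rfl
  rw [hstep, hmGetD_insert]
  by_cases heq : ((x' : Int), y', z') = ((x : Int), y, z)
  · rw [if_pos heq, hval]
    obtain ⟨e1, e2, e3⟩ : x' = x ∧ y' = y ∧ z' = z := by
      simpa [Prod.ext_iff] using heq
    rw [e1, e2, e3]
  · rw [if_neg heq]
    have hne : ¬(x' = x ∧ y' = y ∧ z' = z) := by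
      intro ⟨e1, e2, e3⟩; exact heq (by rw [e1, e2, e3])
    refine hg x' y' z' hx1' hx2' hy1' hy2' hz1' hz2' ?_
    push_cast at hidx' ⊢
    omega

theorem fold_good : ∀ N : Nat, N ≤ 8000 →
    Good N ((PySem.List.pyRange 0 (N : Int) 1).foldl bStep ∅) := by
  intro N
  induction N with
  | zero =>
    intro _ x y z _ _ _ _ _ _ hidx
    exfalso; push_cast at hidx; omega
  | succ N ih =>
    intro hN
    have hrange : PySem.List.pyRange 0 ((N : Int) + 1) 1
        = PySem.List.pyRange 0 (N : Int) 1 ++ [(N : Int)] :=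
      PySem.List.pyRange_one_succ_right (by positivity)
    rw [show ((N + 1 : Nat) : Int) = (N : Int) + 1 by push_cast; ring, hrange,
      List.foldl_append, List.foldl_cons, List.foldl_nil]
    have hg : Good N ((PySem.List.pyRange 0 (N : Int) 1).foldl bStep ∅) :=
      ih (by omega)
    unfold bStep
    have hx : PySem.Int.floordiv (N : Int) 400 = ((N / 400 : Nat) : Int) := by
      exact_mod_cast PySem.Int.floordiv_natCast N 400
    have hy : PySem.Int.mod (PySem.Int.floordiv (N : Int) 20) 20
        = ((N / 20 % 20 : Nat) : Int) := by
      have h1 : PySem.Int.floordiv (N : Int) 20 = ((N / 20 : Nat) : Int) := by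
        exact_mod_cast PySem.Int.floordiv_natCast N 20
      rw [h1]; exact_mod_cast PySem.Int.mod_natCast (N / 20) 20
    have hz : PySem.Int.mod (N : Int) 20 = ((N % 20 : Nat) : Int) := by
      exact_mod_cast PySem.Int.mod_natCast N 20
    rw [hx, hy, hz]
    exact bCell_good N _ hg _ _ _ (by push_cast; omega) (by push_cast; omega)
      (by push_cast; omega) (by push_cast; omega) (by push_cast; omega)
      (by push_cast; omega) (by push_cast; omega)

theorem bTable_good : Good 8000 bTable := by
  have h := fold_good 8000 le_rfl
  have : ((8000 : Nat) : Int) = (8000 : Int) := by norm_num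
  rw [this] at h
  exact h

theorem w_alt_eq_pw (a b c : Int) : w_alt a b c = pw a b c := by
  unfold w_alt
  split_ifs with h1 h2
  · rw [pw, if_pos h1]
  · conv_rhs => rw [pw]
    rw [if_neg h1, if_pos h2]
    exact bTable_good 20 20 20 (by norm_num) (by norm_num) (by norm_num)
      (by norm_num) (by norm_num) (by norm_num) (by norm_num)
  · push Not at h1 h2
    exact bTable_good a b c (by omega) (by omega) (by omega) (by omega)
      (by omega) (by omega) (by push_cast; omega)

-- ===== VERDICT (by name: the statement is the Claim_ definition above) =====
theorem w_spec : Claim_equal_w := by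
  intro a b c _
  unfold Spec_w
  rw [w_eq_pw, w_alt_eq_pw]
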